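-- pv_equiv track=rewrite | github.com/velerianstark-creator/neetcode-submissions-wtlbfyop | Data Structures & Algorithms/permutation-string/submission-1.py | convert
-- ===== SOURCE A (Python) =====
-- def convert(s: str):
--     my_map = {}
--     my_set = set()
--     for ch in s:
--         if ch in my_map:
--             my_map[ch] += 1
--         else:
--             my_map[ch] = 1
--     for k, v in my_map.items():
--         my_set.add(str(v) + k)
--     return my_set
-- ===== SOURCE B (Python) =====
-- def convert(s: str):
--     # Partition-and-conquer, no counting dict: repeatedly take the first
--     # remaining character, split off all its occurrences (the count is the
--     # length drop), and continue on what is left.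
--     out = set()
--     rest = list(s)
--     while rest:
--         c = rest[0]
--         remaining = [x for x in rest if x != c]
--         out.add(str(len(rest) - len(remaining)) + c)
--         rest = remaining
--     return out
-- ===== Notes on version B (the rewrite author's own statement) =====
-- stated objective: alternative
-- what changed: Replaces A's counting dict plus a second loop over its items by a partition loop that consumes the list: take the first remaining character, filter out all its occurrences, and derive its count from the length drop; no dict or per-character counter is built.
import Mathlib
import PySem

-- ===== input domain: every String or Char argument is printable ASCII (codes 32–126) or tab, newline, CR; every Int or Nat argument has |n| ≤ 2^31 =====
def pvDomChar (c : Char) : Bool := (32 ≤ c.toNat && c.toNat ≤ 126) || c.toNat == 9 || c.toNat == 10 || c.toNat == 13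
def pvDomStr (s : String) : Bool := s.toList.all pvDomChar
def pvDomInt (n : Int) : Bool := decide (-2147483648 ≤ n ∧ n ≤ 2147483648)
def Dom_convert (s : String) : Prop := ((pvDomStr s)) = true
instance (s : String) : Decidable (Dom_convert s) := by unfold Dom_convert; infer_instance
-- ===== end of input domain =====

-- B replaces A's counting dict + items loop by a partition loop that consumes the
-- character list: take the first char, filter out all its occurrences, and read its
-- count off the length drop; same return value, no dict built (objective: alternative).

-- ===== PORT A =====
-- str(v) + k (string concatenation) is ported as String.ofList (toChars v ++ [k])
def convert (s : String) : List String :=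
  (s.toList.foldl
      (fun (d : PySem.Dict Char Int) ch =>
        if d.contains ch then d.insert ch (d.getD ch 0 + 1) else d.insert ch 1)
      PySem.Dict.empty).items.foldl
    (fun st kv => PySem.Set.add st (String.ofList (PySem.Int.toChars kv.2 ++ [kv.1])))
    PySem.Set.empty

-- ===== PORT B =====
-- the while loop: rest = c :: t, remaining = [x for x in rest if x != c],
-- add str(len(rest) - len(remaining)) + c, continue on remaining
def convertAltGo (rest : List Char) (out : PySem.Set String) : PySem.Set String :=
  match rest with
  | [] => out
  | c :: t =>
    let remaining := (c :: t).filter (fun x => x != c)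
    convertAltGo remaining
      (PySem.Set.add out
        (String.ofList (PySem.Int.toChars ((((c :: t).length - remaining.length : Nat)) : Int) ++ [c])))
termination_by rest.length
decreasing_by
  simp only [List.filter_cons, bne_self_eq_false, Bool.false_eq_true, if_false,
    List.length_cons]
  exact Nat.lt_succ_of_le (List.length_filter_le _ _)

def convert_alt (s : String) : List String :=
  convertAltGo s.toList PySem.Set.empty

-- ===== PRECONDITION & SPEC =====
def Spec_convert (s : String) (out : List String) : Prop := out = convert_alt s
instance (s : String) (out : List String) : Decidable (Spec_convert s out) := by unfold Spec_convert; infer_instance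

-- ===== CLAIM (what is proved, stated in full; the proofs are below) =====
def Claim_equal_convert : Prop := ∀ (s : String), Dom_convert s → Spec_convert s (convert s)

-- ===== LEMMAS AND PROOFS =====

-- a fold of Set.add of f over l is ofList of the mapped list
lemma foldl_add_eq_ofList_map {α β : Type} [BEq β] (f : α → β) (l : List α) :
    l.foldl (fun st c => PySem.Set.add st (f c)) PySem.Set.empty
      = PySem.Set.ofList (l.map f) := by
  rw [← PySem.Set.update_map_eq_foldl_add]
  exact PySem.Set.update_nil_left _

-- A's dict-building step equals the canonical counter step
lemma counter_step_eq :
    (fun (d : PySem.Dict Char Int) ch =>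
        if d.contains ch then d.insert ch (d.getD ch 0 + 1) else d.insert ch 1)
      = (fun d x => d.insert x (d.getD x 0 + 1)) := by
  funext d ch
  by_cases h : d.contains ch = true
  · simp [h]
  · have hn : d.get? ch = none := by
      cases hg : d.get? ch with
      | none => rfl
      | some v =>
        exfalso; apply h
        rw [PySem.Dict.contains_eq_isSome_get?, hg]; rfl
    simp [h, PySem.Dict.getD, hn]

-- once c is already in the accumulated set, occurrences of c in the tail are no-ops
lemma foldl_add_filter_ne {α : Type} [BEq α] [LawfulBEq α] (c : α) :
    ∀ (l : List α) (s : PySem.Set α), c ∈ s →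
      l.foldl PySem.Set.add s = (l.filter (fun x => x != c)).foldl PySem.Set.add s := by
  intro l
  induction l with
  | nil => intro s _; rfl
  | cons x t ih =>
    intro s hs
    by_cases hx : x = c
    · subst hx
      have hadd : PySem.Set.add s x = s := by simp [PySem.Set.add, hs]
      simp [List.foldl_cons, hadd, ih s hs]
    · have hne : (x != c) = true := by simp [hx]
      have hs' : c ∈ PySem.Set.add s x := by
        by_cases h : x ∈ s <;> simp [PySem.Set.add, h, hs]
      simp [hne, List.foldl_cons, ih _ hs']

-- a head element never added again can be split off the fold
lemma foldl_add_cons_split {α : Type} [BEq α] [LawfulBEq α] (c : α) :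
    ∀ (l : List α) (s : PySem.Set α), (∀ x ∈ l, x ≠ c) →
      l.foldl PySem.Set.add (c :: s) = c :: l.foldl PySem.Set.add s := by
  intro l
  induction l with
  | nil => intro s _; rfl
  | cons x t ih =>
    intro s hl
    have hx : x ≠ c := hl x (by simp)
    have hstep : PySem.Set.add (c :: s) x = c :: PySem.Set.add s x := by
      by_cases h : x ∈ s <;> simp [PySem.Set.add, h, hx]
    simp only [List.foldl_cons, hstep]
    exact ih _ (fun y hy => hl y (by simp [hy]))

-- dedup of c :: t puts c first and continues on t with c's occurrences removed
lemma dedup_cons_filter {α : Type} [BEq α] [LawfulBEq α] (c : α) (t : List α) :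
    PySem.List.dedup (c :: t) = c :: PySem.List.dedup (t.filter (fun x => x != c)) := by
  have h1 : PySem.List.dedup (c :: t)
      = t.foldl PySem.Set.add (PySem.Set.add PySem.Set.empty c) := by
    rw [PySem.List.dedup_eq_ofList, PySem.Set.ofList_eq_foldl]
    rfl
  have hcs : PySem.Set.add PySem.Set.empty c = [c] := by
    simp [PySem.Set.add, PySem.Set.empty]
  have hc : c ∈ PySem.Set.add PySem.Set.empty c := by rw [hcs]; simp
  rw [h1, foldl_add_filter_ne c t _ hc, hcs]
  have := foldl_add_cons_split c (t.filter (fun x => x != c)) []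
    (by intro x hx; simpa using (List.mem_filter.mp hx).2)
  rw [this, PySem.List.dedup_eq_ofList, PySem.Set.ofList_eq_foldl]

-- filtering out c drops exactly count-of-c elements
lemma filter_ne_length {α : Type} [BEq α] [LawfulBEq α] (c : α) (l : List α) :
    (l.filter (fun x => x != c)).length + l.count c = l.length := by
  induction l with
  | nil => rfl
  | cons x t ih =>
    by_cases hx : x = c
    · subst hx; simp; omega
    · simp [hx]; omega

lemma foldl_congr_mem' {α β : Type} (l : List α) (f g : β → α → β) (b : β)
    (h : ∀ acc, ∀ x ∈ l, f acc x = g acc x) : l.foldl f b = l.foldl g b := by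
  induction l generalizing b with
  | nil => rfl
  | cons x t ih =>
    simp only [List.foldl_cons, h b x (by simp)]
    exact ih _ (fun acc y hy => h acc y (by simp [hy]))

lemma count_filter_ne {α : Type} [BEq α] [LawfulBEq α] (c x : α) (hx : ¬ x = c) (t : List α) :
    (t.filter (fun y => y != c)).count x = t.count x := by
  induction t with
  | nil => rfl
  | cons y t ih =>
    by_cases hy : y = c
    · subst hy
      have : ¬ (y = x) := fun h => hx h.symm
      simp [this, ih]
    · simp [List.count_cons, hy, ih]

-- the partition loop computes, over the distinct characters in first-occurrence
-- order, the same count-prefixed strings (counts read off the current rest)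
lemma go_spec (n : Nat) : ∀ (rest : List Char), rest.length ≤ n → ∀ (out : PySem.Set String),
    convertAltGo rest out
      = (PySem.List.dedup rest).foldl
          (fun st c => PySem.Set.add st
            (String.ofList (PySem.Int.toChars ((rest.count c : Nat) : Int) ++ [c]))) out := by
  induction n with
  | zero =>
    intro rest h out
    have : rest = [] := List.eq_nil_of_length_eq_zero (Nat.le_zero.mp h)
    subst this
    simp [convertAltGo, PySem.List.dedup_eq_ofList, PySem.Set.ofList_eq_foldl]
  | succ n ih =>
    intro rest h out
    cases rest with
    | nil =>
      simp [convertAltGo, PySem.List.dedup_eq_ofList, PySem.Set.ofList_eq_foldl]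
    | cons c t =>
      rw [convertAltGo]
      have hrem : (c :: t).filter (fun x => x != c) = t.filter (fun x => x != c) := by
        simp
      have hlen : (t.filter (fun x => x != c)).length ≤ n := by
        have := List.length_filter_le (fun x => x != c) t
        have ht : t.length ≤ n := by simpa using h
        omega
      rw [hrem, ih _ hlen, dedup_cons_filter, List.foldl_cons]
      have hcount : ((((c :: t).length - (t.filter (fun x => x != c)).length : Nat)) : Int)
          = (((c :: t).count c : Nat) : Int) := by
        have := filter_ne_length c (c :: t)
        rw [hrem] at this
        omega
      rw [hcount]
      apply foldl_congr_mem'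
      intro acc x hx
      have hxmem : x ∈ t.filter (fun x => x != c) := (PySem.List.mem_dedup _ _).mp hx
      have hxne : (x != c) = true := (List.mem_filter.mp hxmem).2
      have hne' : ¬ (x = c) := by simpa using hxne
      have : (t.filter (fun x => x != c)).count x = (c :: t).count x := by
        rw [count_filter_ne c x hne' t]
        have hcx : ¬ (c = x) := fun h => hne' h.symm
        simp [hcx]
      rw [this]

-- ===== VERDICT (by name: the statement is the Claim_ definition above) =====
theorem convert_spec : Claim_equal_convert := by
  intro s _
  unfold Spec_convert convert convert_alt
  set L := s.toList with hL
  -- A side: the dict loop is the counter, whose items are the distinct chars with counts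
  rw [counter_step_eq, PySem.Dict.foldl_insert_getD_add_one_eq_counter, PySem.Dict.items_counter,
    foldl_add_eq_ofList_map, List.map_map]
  -- B side: the partition loop over the same distinct chars
  rw [go_spec L.length L le_rfl, foldl_add_eq_ofList_map, PySem.List.dedup_eq_ofList]
  rfl
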